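-- pv_equiv track=rewrite | github.com/KeithCu/writeragent | plugin/modules/writer/html_math_segment.py | _scan_next_tex_open
-- ===== SOURCE A (Python) =====
-- from typing import Literal
--
-- def _preceding_backslashes(s: str, idx: int) -> int:
--     """Count consecutive ``\\`` characters immediately before *idx*."""
--     n = 0
--     j = idx - 1
--     while j >= 0 and s[j] == "\\":
--         n += 1
--         j -= 1
--     return n
--
-- def _is_escaped(s: str, idx: int) -> bool:
--     return _preceding_backslashes(s, idx) % 2 == 1
--
-- def _scan_next_tex_open(
--     s: str, pos: int
-- ) -> tuple[int, Literal["$$", "$", "\\[", "\\("], bool] | None: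
--     """Return ``(index, delimiter, display_block)`` for the next TeX opener, or None."""
--     n = len(s)
--     i = pos
--     while i < n:
--         if _is_escaped(s, i):
--             i += 1
--             continue
--         if i + 1 < n and s[i : i + 2] == "$$":
--             return (i, "$$", True)
--         if i + 1 < n and s[i : i + 2] == "\\[":
--             return (i, "\\[", True)
--         if i + 1 < n and s[i : i + 2] == "\\(":
--             return (i, "\\(", False)
--         if s[i] == "$":
--             if i + 1 < n and s[i + 1].isdigit():
--                 i += 1
--                 continue
--             return (i, "$", False)
--         i += 1
--     return None
-- ===== SOURCE B (Python) =====
-- # Single forward pass with a running backslash-parity flag: O(n) instead of A's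
-- # O(n^2) re-count of preceding backslashes at every position.
-- def _scan_next_tex_open(s, pos):
--     n = len(s)
--     i = max(pos, 0)
--     # seed the escape parity: parity of the backslash run ending just before i
--     j = min(i, n) - 1
--     while j >= 0 and s[j] == "\\":
--         j -= 1
--     escaped = (i - 1 - j) % 2 == 1
--     while i < n:
--         c = s[i]
--         if not escaped:
--             if c == "$":
--                 if i + 1 < n and s[i + 1] == "$":
--                     return (i, "$$", True)
--                 if not (i + 1 < n and s[i + 1].isdigit()):
--                     return (i, "$", False)
--             elif c == "\\" and i + 1 < n:
--                 if s[i + 1] == "[":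
--                     return (i, "\\[", True)
--                 if s[i + 1] == "(":
--                     return (i, "\\(", False)
--         escaped = c == "\\" and not escaped
--         i += 1
--     return None
-- ===== Notes on version B (the rewrite author's own statement) =====
-- stated objective: faster
-- what changed: Replaces A's per-position backward re-count of preceding backslashes with a single forward pass that maintains a running backslash-parity flag (seeded once before the start position), turning the O(n^2) worst case into O(n). Pre_ excludes negative pos, where A's negative-index wraparound yields accidental negative result indices or an IndexError; B scans from max(pos, 0) there.
-- outside the precondition, e.g. on _scan_next_tex_open('$a', -2): A returns (-2, '$', False), B returns (0, '$', False); on _scan_next_tex_open('$', -2): A raises IndexError, B returns (0, '$', False)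
import Mathlib
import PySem

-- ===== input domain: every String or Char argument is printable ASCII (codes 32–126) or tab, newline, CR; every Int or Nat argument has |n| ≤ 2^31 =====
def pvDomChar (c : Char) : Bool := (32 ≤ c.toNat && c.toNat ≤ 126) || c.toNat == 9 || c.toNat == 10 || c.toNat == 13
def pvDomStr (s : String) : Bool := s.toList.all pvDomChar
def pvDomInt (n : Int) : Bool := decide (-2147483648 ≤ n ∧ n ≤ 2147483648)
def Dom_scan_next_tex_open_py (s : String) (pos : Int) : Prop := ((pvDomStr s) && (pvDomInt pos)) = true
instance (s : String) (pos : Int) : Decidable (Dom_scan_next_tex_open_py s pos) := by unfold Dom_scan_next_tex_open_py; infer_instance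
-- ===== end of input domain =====

-- B replaces A's quadratic backward re-count of escaping backslashes at every position by one
-- forward pass carrying a running backslash-parity flag (objective: faster; loops are ported with
-- an exact fuel that runs out precisely when the Python loop guard fails).

-- ===== PORT A =====
-- _preceding_backslashes's loop: while j >= 0 and s[j] == "\\": n += 1; j -= 1
-- (fuel = j + 1, the maximal number of iterations; j < len s in every call A makes, so s[j] is in range)
def pvPbsGo (cs : List Char) : Nat → Int → Int → Int
  | 0, _, acc => acc
  | fuel + 1, j, acc =>
    if 0 ≤ j ∧ PySem.List.pyGet? cs j = some '\\' then pvPbsGo cs fuel (j - 1) (acc + 1) else acc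

-- _preceding_backslashes followed by A's `% 2 == 1` test (_is_escaped)
def pvIsEscaped (cs : List Char) (idx : Int) : Bool := pvPbsGo cs idx.toNat (idx - 1) 0 % 2 == 1

-- s[k].isdigit() for an in-range k (only evaluated under i + 1 < n with 0 ≤ i)
def pvIsDigitAt (cs : List Char) (k : Int) : Bool :=
  ((PySem.List.pyGet? cs k).map PySem.Chars.isdigit).getD false

-- A's while loop, branch for branch (fuel = n - i, the number of remaining iterations)
def pvScanA (cs : List Char) (n : Int) : Nat → Int → Option (Int × String × Bool)
  | 0, _ => none
  | fuel + 1, i =>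
    if i < n then
      if pvIsEscaped cs i then pvScanA cs n fuel (i + 1)
      else if i + 1 < n ∧ PySem.List.slice cs (some i) (some (i + 2)) = ['$', '$'] then some (i, "$$", true)
      else if i + 1 < n ∧ PySem.List.slice cs (some i) (some (i + 2)) = ['\\', '['] then some (i, "\\[", true)
      else if i + 1 < n ∧ PySem.List.slice cs (some i) (some (i + 2)) = ['\\', '('] then some (i, "\\(", false)
      else if PySem.List.pyGet? cs i = some '$' then
        if i + 1 < n ∧ pvIsDigitAt cs (i + 1) then pvScanA cs n fuel (i + 1)
        else some (i, "$", false)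
      else pvScanA cs n fuel (i + 1)
    else none

def scan_next_tex_open_py (s : String) (pos : Int) : Option (Int × String × Bool) :=
  pvScanA s.toList (s.toList.length : Int) ((s.toList.length : Int) - pos).toNat pos

-- ===== PORT B =====
-- B's seed loop: while j >= 0 and s[j] == "\\": j -= 1   (fuel = j + 1)
def pvSkipBs (cs : List Char) : Nat → Int → Int
  | 0, j => j
  | fuel + 1, j =>
    if 0 ≤ j ∧ PySem.List.pyGet? cs j = some '\\' then pvSkipBs cs fuel (j - 1) else j

-- B's forward loop: escaped is the running backslash parity (0 ≤ i < n on every call, so s[i] is in range)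
def pvScanB (cs : List Char) (n : Int) : Nat → Int → Bool → Option (Int × String × Bool)
  | 0, _, _ => none
  | fuel + 1, i, escaped =>
    if i < n then
      let c := (PySem.List.pyGet? cs i).getD ' '
      if escaped = false then
        if c = '$' then
          if i + 1 < n ∧ PySem.List.pyGet? cs (i + 1) = some '$' then some (i, "$$", true)
          else if ¬ (i + 1 < n ∧ pvIsDigitAt cs (i + 1)) then some (i, "$", false)
          else pvScanB cs n fuel (i + 1) (c == '\\' && !escaped)
        else if c = '\\' ∧ i + 1 < n then
          if PySem.List.pyGet? cs (i + 1) = some '[' then some (i, "\\[", true)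
          else if PySem.List.pyGet? cs (i + 1) = some '(' then some (i, "\\(", false)
          else pvScanB cs n fuel (i + 1) (c == '\\' && !escaped)
        else pvScanB cs n fuel (i + 1) (c == '\\' && !escaped)
      else pvScanB cs n fuel (i + 1) (c == '\\' && !escaped)
    else none

def scan_next_tex_open_py_alt (s : String) (pos : Int) : Option (Int × String × Bool) :=
  let cs := s.toList
  let n : Int := (cs.length : Int)
  let i := max pos 0
  let j := pvSkipBs cs (min i n).toNat (min i n - 1)
  pvScanB cs n (n - i).toNat i ((min i n - 1 - j) % 2 == 1)

-- ===== PRECONDITION & SPEC =====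
-- Pre_ excludes negative pos, where A's negative-index wraparound yields accidental negative
-- result indices (e.g. A("$a", -2) = (-2, '$', False)) or, for pos < -len(s), an IndexError;
-- B scans from max(pos, 0) there.
def Pre_scan_next_tex_open_py (s : String) (pos : Int) : Prop := 0 ≤ pos
instance (s : String) (pos : Int) : Decidable (Pre_scan_next_tex_open_py s pos) := by unfold Pre_scan_next_tex_open_py; infer_instance

def pvWitness_scan_next_tex_open_py : String × Int := ("a\\$b $x", 0)

def Spec_scan_next_tex_open_py (s : String) (pos : Int) (out : Option (Int × String × Bool)) : Prop := out = scan_next_tex_open_py_alt s pos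
instance (s : String) (pos : Int) (out : Option (Int × String × Bool)) : Decidable (Spec_scan_next_tex_open_py s pos out) := by unfold Spec_scan_next_tex_open_py; infer_instance

-- ===== CLAIM (what is proved, stated in full; the proofs are below) =====
def Claim_equal_scan_next_tex_open_py : Prop := ∀ (s : String) (pos : Int), Dom_scan_next_tex_open_py s pos → Pre_scan_next_tex_open_py s pos → Spec_scan_next_tex_open_py s pos (scan_next_tex_open_py s pos)

-- ===== LEMMAS AND PROOFS =====

theorem pvPbsGo_shift (cs : List Char) (fuel : Nat) (j acc : Int) :
    pvPbsGo cs fuel j acc = acc + pvPbsGo cs fuel j 0 := by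
  induction fuel generalizing j acc with
  | zero => simp [pvPbsGo]
  | succ fuel ih =>
    simp only [pvPbsGo]
    split_ifs with h
    · rw [ih (j - 1) (acc + 1), ih (j - 1) (0 + 1)]; ring
    · simp

theorem pvPbsGo_eq_sub_skip (cs : List Char) (fuel : Nat) (j : Int) :
    pvPbsGo cs fuel j 0 = j - pvSkipBs cs fuel j := by
  induction fuel generalizing j with
  | zero => simp [pvPbsGo, pvSkipBs]
  | succ fuel ih =>
    simp only [pvPbsGo, pvSkipBs]
    split_ifs with h
    · rw [pvPbsGo_shift, ih (j - 1)]; ring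
    · simp

theorem pvIsEscaped_succ (cs : List Char) (i : Int) (hi : 0 ≤ i) :
    pvIsEscaped cs (i + 1) = ((PySem.List.pyGet? cs i == some '\\') && !pvIsEscaped cs i) := by
  unfold pvIsEscaped
  have h1 : (i + 1).toNat = i.toNat + 1 := by omega
  rw [h1]
  simp only [pvPbsGo, add_sub_cancel_right]
  split_ifs with h
  · rcases h with ⟨-, h2⟩
    rw [pvPbsGo_shift]
    simp only [h2, beq_self_eq_true, Bool.true_and]
    rcases Int.emod_two_eq_zero_or_one (pvPbsGo cs i.toNat (i - 1) 0) with hp | hp <;>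
      simp [Int.add_emod, hp]
  · have h2 : ¬ (PySem.List.pyGet? cs i = some '\\') := by tauto
    simp [h2]

theorem pvSlice_two (cs : List Char) (i : Int) (a b : Char) (hi : 0 ≤ i) (h2 : i + 1 < (cs.length : Int)) :
    PySem.List.slice cs (some i) (some (i + 2)) = [a, b] ↔
      (PySem.List.pyGet? cs i = some a ∧ PySem.List.pyGet? cs (i + 1) = some b) := by
  rw [PySem.List.slice_toNat cs hi (by omega)]
  have hk : (i + 2).toNat - i.toNat = 2 := by omega
  have hlen : 2 ≤ (cs.drop i.toNat).length := by
    rw [List.length_drop]; omega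
  rw [hk]
  rcases hd : cs.drop i.toNat with _ | ⟨u, t⟩
  · rw [hd] at hlen; simp at hlen
  · rcases t with _ | ⟨v, t⟩
    · rw [hd] at hlen; simp at hlen
    · have e1 : PySem.List.pyGet? cs i = some u := by
        rw [PySem.List.pyGet?_of_nonneg cs hi]
        have : (List.drop i.toNat cs)[0]? = cs[i.toNat + 0]? := List.getElem?_drop
        simp only [hd, Nat.add_zero] at this
        simp [← this]
      have e2 : PySem.List.pyGet? cs (i + 1) = some v := by
        rw [PySem.List.pyGet?_of_nonneg cs (show (0:Int) ≤ i + 1 by omega)]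
        have h1n : (i + 1).toNat = i.toNat + 1 := by omega
        have : (List.drop i.toNat cs)[1]? = cs[i.toNat + 1]? := List.getElem?_drop
        simp only [hd] at this
        simp [h1n, ← this]
      rw [e1, e2]
      simp

theorem pvScan_main (cs : List Char) (fuel : Nat) (i : Int) (e : Bool) (hi : 0 ≤ i)
    (he : e = pvIsEscaped cs i) :
    pvScanB cs (cs.length : Int) fuel i e = pvScanA cs (cs.length : Int) fuel i := by
  induction fuel generalizing i e with
  | zero => rfl
  | succ fuel ih =>
    by_cases hlt : i < (cs.length : Int)
    case neg => simp [pvScanA, pvScanB, hlt]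
    case pos =>
    have hget : PySem.List.pyGet? cs i = some cs[i.toNat] := PySem.List.pyGet?_eq_some_getElem cs hi hlt
    have hesc := pvIsEscaped_succ cs i hi
    rw [hget] at hesc
    by_cases hb : pvIsEscaped cs i = true
    · have heq : e = true := by rw [he, hb]
      subst heq
      simp only [pvScanA, pvScanB, if_pos hlt, hget, Option.getD_some]
      rw [if_pos hb, if_neg (by simp : ¬ (true = false))]
      exact ih (i + 1) _ (by omega) (by simp [hesc, hb])
    · have hbf : pvIsEscaped cs i = false := by revert hb; cases pvIsEscaped cs i <;> simp
      have heq : e = false := by rw [he, hbf]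
      subst heq
      simp only [pvScanA, pvScanB, if_pos hlt, hget, Option.getD_some]
      rw [if_pos (show (True:Prop) from trivial)]
      by_cases hn : i + 1 < (cs.length : Int)
      · have hget1 : PySem.List.pyGet? cs (i + 1) = some cs[(i + 1).toNat] :=
          PySem.List.pyGet?_eq_some_getElem cs (by omega) hn
        simp only [pvSlice_two cs i _ _ hi hn, hget, hget1, Option.some.injEq]
        by_cases h0 : cs[i.toNat] = '$'
        · by_cases h1 : cs[(i + 1).toNat] = '$'
          · simp [hn, h0, h1, hbf]
          · by_cases hd : pvIsDigitAt cs (i + 1) = true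
            · simp [hn, h0, h1, hd, hbf]
              exact ih (i + 1) _ (by omega) (by simp [hesc, h0, hbf])
            · simp [hn, h0, h1, hd, hbf]
        · by_cases hbs : cs[i.toNat] = '\\'
          · by_cases h1 : cs[(i + 1).toNat] = '['
            · simp [hn, hbs, h1, hbf]
            · by_cases h2 : cs[(i + 1).toNat] = '('
              · simp [hn, hbs, h2, hbf]
              · simp [hn, hbs, h1, h2, hbf]
                exact ih (i + 1) _ (by omega) (by simp [hesc, hbs, hbf])
          · simp [hn, h0, hbs, hbf]
            exact ih (i + 1) _ (by omega) (by simp [hesc, hbf])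
      · by_cases h0 : cs[i.toNat] = '$'
        · simp [hn, h0, hbf]
        · by_cases hbs : cs[i.toNat] = '\\'
          · simp [hn, hbs, hbf]
            exact ih (i + 1) _ (by omega) (by simp [hesc, hbs, hbf])
          · simp [hn, h0, hbs, hbf]
            exact ih (i + 1) _ (by omega) (by simp [hesc, hbf])

-- ===== VERDICT (by name: the statement is the Claim_ definition above) =====
theorem scan_next_tex_open_py_spec : Claim_equal_scan_next_tex_open_py := by
  intro s pos _ hp
  have hp0 : (0 : Int) ≤ pos := hp
  unfold Spec_scan_next_tex_open_py scan_next_tex_open_py scan_next_tex_open_py_alt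
  dsimp only
  have hmax : max pos 0 = pos := by omega
  rw [hmax]
  by_cases hle : pos ≤ (s.toList.length : Int)
  · have hmin : min pos (s.toList.length : Int) = pos := by omega
    rw [hmin]
    have hseed : ((pos - 1 - pvSkipBs s.toList pos.toNat (pos - 1)) % 2 == 1) = pvIsEscaped s.toList pos := by
      unfold pvIsEscaped
      rw [← pvPbsGo_eq_sub_skip]
    rw [hseed]
    exact (pvScan_main s.toList ((s.toList.length : Int) - pos).toNat pos _ hp0 rfl).symm
  · have h0 : ((s.toList.length : Int) - pos).toNat = 0 := by omega
    rw [h0]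
    rfl
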